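-- pv_equiv track=rewrite | github.com/ngarcia11235/test-repo | dbanalysis.py | clearn
-- ===== SOURCE A (Python) =====
-- def clearn(text):
--     # cleans up the input and returns a more usable text
--     newword=''
--     wordlist=[]
--     v=0
--     for x in text:
--         a=0
--         v+=1
--         if 64<ord(x)<91:
--             a=1
--             newword+=x
--         if 96<ord(x)<123:
--             a=1
--             newword+=x
--         if a==0:
--             wordlist.append(newword)
--             newword=''
--     return wordlist
-- ===== SOURCE B (Python) =====
-- import re
--
-- def clearn(text):
--     # cleans up the input and returns a more usable text
--     return re.split('[^A-Za-z]', text)[:-1]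
-- ===== Notes on version B (the rewrite author's own statement) =====
-- stated objective: idiomatic
-- what changed: Replaces the manual per-character scan with ord-range tests, a flag and a buffer/flush accumulator by a single regex split on [^A-Za-z] followed by dropping the trailing never-flushed segment; the C regex engine gives a large constant-factor speedup.
import Mathlib
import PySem

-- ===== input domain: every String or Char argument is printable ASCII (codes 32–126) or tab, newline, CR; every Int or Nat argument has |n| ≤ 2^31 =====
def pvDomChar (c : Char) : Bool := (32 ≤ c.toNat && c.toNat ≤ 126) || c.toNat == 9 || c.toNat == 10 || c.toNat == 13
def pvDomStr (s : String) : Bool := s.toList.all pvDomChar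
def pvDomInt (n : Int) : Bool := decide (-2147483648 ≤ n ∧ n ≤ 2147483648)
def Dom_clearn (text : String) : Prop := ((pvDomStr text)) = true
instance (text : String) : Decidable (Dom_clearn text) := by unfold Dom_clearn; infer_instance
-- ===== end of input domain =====

-- B replaces A's manual per-character scan (ord-range tests, flag, buffer/flush) by a regex
-- split on non-letters re.split('[^A-Za-z]', text)[:-1]; idiomatic, same return value.

-- ===== PORT A =====
-- A's growing string newword is ported as a List Char buffer (string concatenation =
-- char-list append; String.mk at flush time); the dead counter v is omitted.
def clearnLoop : List Char → List Char → List String → List String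
  | [], _, wordlist => wordlist
  | x :: rest, newword, wordlist =>
    let a : Int := 0
    let (a, newword) :=
      if 64 < x.toNat ∧ x.toNat < 91 then (1, newword ++ [x]) else (a, newword)
    let (a, newword) :=
      if 96 < x.toNat ∧ x.toNat < 123 then ((1 : Int), newword ++ [x]) else (a, newword)
    if a = 0 then clearnLoop rest [] (wordlist ++ [String.mk newword])
    else clearnLoop rest newword wordlist

def clearn (text : String) : List String := clearnLoop text.toList [] []

-- ===== PORT B =====
-- re.split('[^A-Za-z]', text): the pattern matches exactly one non-letter character, so the
-- split cuts the character list at every char outside [A-Za-z]; ported by hand (exact on Dom):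
def pvIsAZ (c : Char) : Bool := (65 ≤ c.toNat && c.toNat ≤ 90) || (97 ≤ c.toNat && c.toNat ≤ 122)

def pvReSplitNonAlpha : List Char → List (List Char)
  | [] => [[]]
  | c :: rest =>
    if pvIsAZ c then
      match pvReSplitNonAlpha rest with
      | seg :: segs => (c :: seg) :: segs
      | [] => [[c]]
    else [] :: pvReSplitNonAlpha rest

def clearn_alt (text : String) : List String :=
  (((pvReSplitNonAlpha text.toList).map String.mk)).dropLast   -- the [:-1]

-- ===== PRECONDITION & SPEC =====
def Spec_clearn (text : String) (out : List String) : Prop := out = clearn_alt text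
instance (text : String) (out : List String) : Decidable (Spec_clearn text out) := by unfold Spec_clearn; infer_instance

-- ===== CLAIM (what is proved, stated in full; the proofs are below) =====
def Claim_equal_clearn : Prop := ∀ (text : String), Dom_clearn text → Spec_clearn text (clearn text)

-- ===== LEMMAS AND PROOFS =====

theorem pvReSplitNonAlpha_ne_nil (cs : List Char) : pvReSplitNonAlpha cs ≠ [] := by
  cases cs with
  | nil => simp [pvReSplitNonAlpha]
  | cons c rest =>
    simp only [pvReSplitNonAlpha]
    split
    · cases h : pvReSplitNonAlpha rest <;> simp
    · simp

-- prepend buf to the first segment (the segment the loop's buffer is in the middle of)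
def pvPrefixFirst (buf : List Char) : List (List Char) → List (List Char)
  | [] => [buf]
  | s :: ss => (buf ++ s) :: ss

theorem clearnLoop_eq (cs buf : List Char) (acc : List String) :
    clearnLoop cs buf acc =
      acc ++ ((pvPrefixFirst buf (pvReSplitNonAlpha cs)).map String.mk).dropLast := by
  induction cs generalizing buf acc with
  | nil => simp [clearnLoop, pvReSplitNonAlpha, pvPrefixFirst]
  | cons x rest ih =>
    by_cases hU : 64 < x.toNat ∧ x.toNat < 91
    · have hL : ¬ (96 < x.toNat ∧ x.toNat < 123) := by omega
      have hAZ : pvIsAZ x = true := by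
        simp only [pvIsAZ, Bool.or_eq_true, Bool.and_eq_true, decide_eq_true_eq]; omega
      simp only [clearnLoop, if_pos hU, if_neg hL, if_neg (by norm_num : ¬ (1 : Int) = 0)]
      rw [ih]
      obtain ⟨seg, segs, hss⟩ : ∃ seg segs, pvReSplitNonAlpha rest = seg :: segs := by
        cases h : pvReSplitNonAlpha rest with
        | nil => exact absurd h (pvReSplitNonAlpha_ne_nil rest)
        | cons a b => exact ⟨a, b, rfl⟩
      simp [pvReSplitNonAlpha, hAZ, hss, pvPrefixFirst]
    · by_cases hL : 96 < x.toNat ∧ x.toNat < 123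
      · have hAZ : pvIsAZ x = true := by
          simp only [pvIsAZ, Bool.or_eq_true, Bool.and_eq_true, decide_eq_true_eq]; omega
        simp only [clearnLoop, if_neg hU, if_pos hL, if_neg (by norm_num : ¬ (1 : Int) = 0)]
        rw [ih]
        obtain ⟨seg, segs, hss⟩ : ∃ seg segs, pvReSplitNonAlpha rest = seg :: segs := by
          cases h : pvReSplitNonAlpha rest with
          | nil => exact absurd h (pvReSplitNonAlpha_ne_nil rest)
          | cons a b => exact ⟨a, b, rfl⟩
        simp [pvReSplitNonAlpha, hAZ, hss, pvPrefixFirst]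
      · have hAZ : pvIsAZ x = false := by
          simp only [pvIsAZ, Bool.or_eq_false_iff, Bool.and_eq_false_iff]
          constructor <;> simp only [decide_eq_false_iff_not] <;> omega
        simp only [clearnLoop, if_neg hU, if_neg hL]
        rw [ih]
        obtain ⟨seg, segs, hss⟩ : ∃ seg segs, pvReSplitNonAlpha rest = seg :: segs := by
          cases h : pvReSplitNonAlpha rest with
          | nil => exact absurd h (pvReSplitNonAlpha_ne_nil rest)
          | cons a b => exact ⟨a, b, rfl⟩
        have hne : String.mk seg :: segs.map String.mk ≠ [] := by simp
        simp [pvReSplitNonAlpha, hAZ, hss, pvPrefixFirst,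
          List.dropLast_cons_of_ne_nil hne, List.append_assoc]

theorem pvPrefixFirst_nil (ss : List (List Char)) (h : ss ≠ []) : pvPrefixFirst [] ss = ss := by
  cases ss with
  | nil => exact absurd rfl h
  | cons s t => simp [pvPrefixFirst]

-- ===== VERDICT (by name: the statement is the Claim_ definition above) =====
theorem clearn_spec : Claim_equal_clearn := by
  intro text _
  unfold Spec_clearn clearn clearn_alt
  rw [clearnLoop_eq, pvPrefixFirst_nil _ (pvReSplitNonAlpha_ne_nil _)]
  simp
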